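-- pv_equiv track=rewrite | github.com/basharali00/url-shortner | utils/decode.py | encode_to_base_62
-- ===== SOURCE A (Python) =====
-- def encode_to_base_62(num: int, alphabet):
--     if num == 0:
--         return alphabet[0]
--     arr = []
--     arr_append = arr.append
--     _divmod = divmod
--     base = len(alphabet)
--     while num:
--         num, rem = _divmod(num, base)
--         arr_append(alphabet[rem])
--     arr.reverse()
--     return "".join(arr)
-- ===== SOURCE B (Python) =====
-- def encode_to_base_62(num: int, alphabet):
--     if num == 0:
--         return alphabet[0]
--     base = len(alphabet)
--
--     def enc(n):
--         return "" if n == 0 else enc(n // base) + alphabet[n % base]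
--
--     return enc(num)
-- ===== Notes on version B (the rewrite author's own statement) =====
-- stated objective: simpler
-- what changed: Replaces the iterative digit-append-then-reverse loop by a recursive base conversion that emits digits most-significant-first on the way out of the recursion, eliminating the list, the reverse and the join.
import Mathlib
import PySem

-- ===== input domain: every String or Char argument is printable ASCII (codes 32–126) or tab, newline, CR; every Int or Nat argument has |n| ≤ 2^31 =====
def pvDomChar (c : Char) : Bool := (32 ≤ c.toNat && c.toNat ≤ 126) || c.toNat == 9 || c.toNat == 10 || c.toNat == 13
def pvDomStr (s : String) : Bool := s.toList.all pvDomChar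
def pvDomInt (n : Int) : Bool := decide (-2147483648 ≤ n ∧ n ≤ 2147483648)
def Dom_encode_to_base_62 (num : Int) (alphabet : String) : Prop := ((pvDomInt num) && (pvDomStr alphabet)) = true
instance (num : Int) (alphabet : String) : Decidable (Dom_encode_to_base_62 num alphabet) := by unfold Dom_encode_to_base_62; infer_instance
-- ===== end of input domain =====

-- B replaces A's append-digits-then-reverse loop by a recursive base conversion
-- emitting digits most-significant-first (objective: simpler).

-- ===== PORT A =====
-- the 'while num:' loop; fuel (num.toNat + 1) only makes the recursion total —
-- inside Pre_ the loop stops on its own well before the fuel runs out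
def pvLoopA (al : List Char) (base : Int) : Nat → Int → List Char → List Char
  | 0, _, arr => arr
  | fuel + 1, num, arr =>
    if num ≠ 0 then
      let q := PySem.Int.floordiv num base
      let r := PySem.Int.mod num base
      pvLoopA al base fuel q (arr ++ [(PySem.List.pyGet? al r).getD ' '])
    else arr

def encode_to_base_62 (num : Int) (alphabet : String) : String :=
  let al := alphabet.toList
  if num = 0 then String.mk [(PySem.List.pyGet? al 0).getD ' ']
  else String.mk ((pvLoopA al (al.length : Int) (num.toNat + 1) num []).reverse)

-- ===== PORT B =====
-- enc(n) = "" if n == 0 else enc(n // base) + alphabet[n % base]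
-- (the 'base ≤ 1' disjunct only makes the recursion terminate; inside Pre_ base ≥ 2)
def pvEncB (al : List Char) (base : Nat) (n : Nat) : List Char :=
  if h : n = 0 ∨ base ≤ 1 then []
  else pvEncB al base (n / base) ++ [(PySem.List.pyGet? al ((n % base : Nat) : Int)).getD ' ']
  termination_by n
  decreasing_by
    push_neg at h
    exact Nat.div_lt_self (Nat.pos_of_ne_zero h.1) (by omega)

def encode_to_base_62_alt (num : Int) (alphabet : String) : String :=
  let al := alphabet.toList
  if num = 0 then String.mk [(PySem.List.pyGet? al 0).getD ' ']
  else String.mk (pvEncB al al.length num.toNat)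

-- ===== PRECONDITION & SPEC =====
-- Pre_ excludes only inputs where A never returns: negative num and num ≠ 0 with
-- a base-1 alphabet make the while loop run forever; an empty alphabet raises
-- (IndexError at num = 0, ZeroDivisionError otherwise).
def Pre_encode_to_base_62 (num : Int) (alphabet : String) : Prop :=
  0 ≤ num ∧ alphabet.toList ≠ [] ∧ (num = 0 ∨ 2 ≤ alphabet.toList.length)
instance (num : Int) (alphabet : String) : Decidable (Pre_encode_to_base_62 num alphabet) := by
  unfold Pre_encode_to_base_62; infer_instance

def pvWitness_encode_to_base_62 : Int × String := (125, "0123456789abcdefghijklmnopqrstuvwxyzABCDEFGHIJKLMNOPQRSTUVWXYZ")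

def Spec_encode_to_base_62 (num : Int) (alphabet : String) (out : String) : Prop := out = encode_to_base_62_alt num alphabet
instance (num : Int) (alphabet : String) (out : String) : Decidable (Spec_encode_to_base_62 num alphabet out) := by unfold Spec_encode_to_base_62; infer_instance

-- ===== CLAIM (what is proved, stated in full; the proofs are below) =====
def Claim_equal_encode_to_base_62 : Prop := ∀ (num : Int) (alphabet : String), Dom_encode_to_base_62 num alphabet → Pre_encode_to_base_62 num alphabet → Spec_encode_to_base_62 num alphabet (encode_to_base_62 num alphabet)

-- ===== LEMMAS AND PROOFS =====
lemma pvEncB_zero (al : List Char) (base : Nat) : pvEncB al base 0 = [] := by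
  rw [pvEncB]; simp

lemma pvLoopA_eq_encB (al : List Char) (hb : 2 ≤ al.length) :
    ∀ (fuel n : Nat), n ≤ fuel → ∀ arr,
      pvLoopA al (al.length : Int) fuel (n : Int) arr = arr ++ (pvEncB al al.length n).reverse := by
  intro fuel
  induction fuel with
  | zero =>
    intro n hn arr
    have : n = 0 := Nat.le_zero.mp hn
    subst this
    simp [pvLoopA, pvEncB_zero]
  | succ fuel ih =>
    intro n hn arr
    by_cases h0 : n = 0
    · subst h0; simp [pvLoopA, pvEncB_zero]
    · have hq : PySem.Int.floordiv (n : Int) (al.length : Int) = ((n / al.length : Nat) : Int) :=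
        PySem.Int.floordiv_natCast n al.length
      have hr : PySem.Int.mod (n : Int) (al.length : Int) = ((n % al.length : Nat) : Int) :=
        PySem.Int.mod_natCast n al.length
      have hlt : n / al.length < n := Nat.div_lt_self (Nat.pos_of_ne_zero h0) (by omega)
      have hle : n / al.length ≤ fuel := by omega
      have hns : ((n : Int) ≠ 0) := by exact_mod_cast h0
      rw [pvLoopA]
      simp only [hns, if_pos, hq, hr, ne_eq, not_false_eq_true, if_true]
      rw [ih (n / al.length) hle]
      conv_rhs => rw [pvEncB]
      have hcond : ¬ (n = 0 ∨ al.length ≤ 1) := by omega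
      rw [dif_neg hcond]
      simp [List.append_assoc]

-- ===== VERDICT (by name: the statement is the Claim_ definition above) =====
theorem encode_to_base_62_spec : Claim_equal_encode_to_base_62 := by
  intro num alphabet _ hpre
  obtain ⟨hnn, hne, hnum⟩ := hpre
  unfold Spec_encode_to_base_62 encode_to_base_62 encode_to_base_62_alt
  by_cases h0 : num = 0
  · simp [h0]
  · have hb : 2 ≤ alphabet.toList.length := by
      rcases hnum with h | h
      · exact absurd h h0
      · exact h
    simp only [h0, if_neg, if_false]
    have hcast : ((num.toNat : Nat) : Int) = num := Int.toNat_of_nonneg hnn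
    rw [← hcast]
    simp only [Int.toNat_natCast]
    rw [pvLoopA_eq_encB alphabet.toList hb (num.toNat + 1) num.toNat (by omega) []]
    simp
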